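-- pv_equiv track=rewrite | github.com/axmszr/pancake | bakery/sieve.py | filter_by_template
-- ===== SOURCE A (Python) =====
-- def filter_by_template(word_pool, template):
-- 	tem = template.upper()
-- 	alphas = [i for i in range(len(tem)) if tem[i].isalpha()]
-- 	output = []
-- 	for word in word_pool:
-- 		for i in alphas:
-- 			if word[i].upper() != tem[i]:
-- 				break
-- 		else:
-- 			output.append(word)
-- 	return tuple(output)
-- ===== SOURCE B (Python) =====
-- def filter_by_template(word_pool, template):
-- 	pool = list(word_pool)
-- 	for i, c in enumerate(template.upper()):
-- 		if c.isalpha():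
-- 			pool = [w for w in pool if w[i].upper() == c]
-- 	return tuple(pool)
-- ===== Notes on version B (the rewrite author's own statement) =====
-- stated objective: alternative
-- what changed: Inverts the loop nesting: instead of A's per-word scan over a precomputed list of alphabetic positions, B makes one filtering pass over the progressively shrinking pool for each alphabetic template position, never building an index list or a per-word inner loop.
import Mathlib
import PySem

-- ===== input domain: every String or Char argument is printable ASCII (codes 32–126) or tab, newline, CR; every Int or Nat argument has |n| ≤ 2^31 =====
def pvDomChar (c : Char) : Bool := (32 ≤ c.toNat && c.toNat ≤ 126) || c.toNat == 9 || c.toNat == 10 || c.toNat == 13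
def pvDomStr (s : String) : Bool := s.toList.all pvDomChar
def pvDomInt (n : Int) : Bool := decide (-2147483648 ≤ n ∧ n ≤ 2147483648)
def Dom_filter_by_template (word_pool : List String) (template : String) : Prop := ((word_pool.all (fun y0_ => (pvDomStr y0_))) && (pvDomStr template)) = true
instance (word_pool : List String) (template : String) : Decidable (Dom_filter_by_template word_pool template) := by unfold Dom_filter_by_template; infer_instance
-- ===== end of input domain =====

-- B inverts the loop nesting: instead of A's per-word scan over a precomputed alphabetic-index
-- list, B makes one filtering pass over the progressively shrinking pool per alphabetic
-- template position. Same cost, genuinely different traversal order.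

-- ===== PORT A =====
-- inner for-loop over the precomputed alpha index list, with break/else ('true' = no break)
def pvCheckA (w tem : List Char) : List Int → Bool
  | [] => true
  | i :: rest =>
      if PySem.Chars.upperChar (PySem.List.pyGetD w i ' ') ≠ PySem.List.pyGetD tem i ' ' then false
      else pvCheckA w tem rest

def filter_by_template (word_pool : List String) (template : String) : List String :=
  let tem := (PySem.Str.upper template).toList
  let alphas := (PySem.List.pyRange 0 (tem.length : Int) 1).filter
    (fun i => PySem.Chars.isalpha (PySem.List.pyGetD tem i ' '))
  word_pool.foldl (fun output word =>
    if pvCheckA word.toList tem alphas then output ++ [word] else output) []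

-- ===== PORT B =====
-- outer loop over enumerate(template.upper()); each alphabetic position filters the pool once
def filter_by_template_alt (word_pool : List String) (template : String) : List String :=
  (PySem.List.enumerate (PySem.Str.upper template).toList 0).foldl
    (fun pool p =>
      if PySem.Chars.isalpha p.2 then
        pool.filter (fun w => PySem.Chars.upperChar (PySem.List.pyGetD w.toList p.1 ' ') == p.2)
      else pool)
    word_pool

-- ===== PRECONDITION & SPEC =====
-- Pre_ excludes exactly the inputs where Python A (and B alike) raises IndexError: some word is
-- shorter than an alphabetic template position that the short-circuiting scan actually reaches
-- (i.e. no earlier in-range alphabetic position already mismatches).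
def Pre_filter_by_template (word_pool : List String) (template : String) : Prop :=
  ∀ w ∈ word_pool, ∀ i < (PySem.Str.upper template).toList.length,
    (PySem.Chars.isalpha ((PySem.Str.upper template).toList.getD i ' ') = true
       ∧ w.toList.length ≤ i) →
    ∃ j < i, j < w.toList.length
       ∧ PySem.Chars.isalpha ((PySem.Str.upper template).toList.getD j ' ') = true
       ∧ PySem.Chars.upperChar (w.toList.getD j ' ') ≠ (PySem.Str.upper template).toList.getD j ' '
instance (word_pool : List String) (template : String) : Decidable (Pre_filter_by_template word_pool template) := by
  unfold Pre_filter_by_template; infer_instance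

def pvWitness_filter_by_template : List String × String := (["cat", "dog"], "c_t")

def Spec_filter_by_template (word_pool : List String) (template : String) (out : List String) : Prop := out = filter_by_template_alt word_pool template
instance (word_pool : List String) (template : String) (out : List String) : Decidable (Spec_filter_by_template word_pool template out) := by unfold Spec_filter_by_template; infer_instance

-- ===== CLAIM (what is proved, stated in full; the proofs are below) =====
def Claim_equal_filter_by_template : Prop := ∀ (word_pool : List String) (template : String), Dom_filter_by_template word_pool template → Pre_filter_by_template word_pool template → Spec_filter_by_template word_pool template (filter_by_template word_pool template)

-- ===== LEMMAS AND PROOFS =====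
-- A's break/else loop is the 'all' of its membership test over the index list
theorem pvCheckA_eq_all (w tem : List Char) (l : List Int) :
    pvCheckA w tem l
      = l.all (fun i => PySem.Chars.upperChar (PySem.List.pyGetD w i ' ') == PySem.List.pyGetD tem i ' ') := by
  induction l with
  | nil => rfl
  | cons i rest ih =>
      simp only [pvCheckA, List.all_cons]
      split_ifs with h
      · simp [h]
      · simp at h
        simp [h, ih]

-- 'all' over a filtered list = 'all' of the guarded test over the whole list
theorem all_filter_eq (l : List Int) (p q : Int → Bool) :
    (l.filter p).all q = l.all (fun x => !p x || q x) := by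
  induction l with
  | nil => rfl
  | cons x xs ih =>
      by_cases h : p x = true <;> simp [h, ih]

-- B's sequence of filtering passes = one filter by the conjunction of all guarded tests
theorem foldl_filter_eq (cs : List (Int × Char)) (pool : List String) :
    cs.foldl (fun pl p => if PySem.Chars.isalpha p.2 then
        pl.filter (fun w => PySem.Chars.upperChar (PySem.List.pyGetD w.toList p.1 ' ') == p.2)
      else pl) pool
      = pool.filter (fun w => cs.all (fun p => !PySem.Chars.isalpha p.2 ||
          (PySem.Chars.upperChar (PySem.List.pyGetD w.toList p.1 ' ') == p.2))) := by
  induction cs generalizing pool with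
  | nil => simp
  | cons c cs ih =>
      simp only [List.foldl_cons, List.all_cons]
      by_cases h : PySem.Chars.isalpha c.2 = true
      · rw [if_pos h, ih, List.filter_filter]
        apply List.filter_congr; intro w _; simp [h, Bool.and_comm]
      · rw [if_neg h, ih]
        apply List.filter_congr; intro w _
        simp [Bool.eq_false_iff.mpr h]

-- ===== VERDICT (by name: the statement is the Claim_ definition above) =====
theorem filter_by_template_spec : Claim_equal_filter_by_template := by
  intro word_pool template _hDom _hPre
  unfold Spec_filter_by_template filter_by_template filter_by_template_alt
  simp only []
  rw [PySem.List.foldl_append_if_eq_filter, foldl_filter_eq]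
  simp only [List.nil_append]
  apply List.filter_congr
  intro w _
  rw [pvCheckA_eq_all, all_filter_eq,
    PySem.List.enumerate_eq_map_pyRange (d := ' '), List.all_map]
  rfl
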